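-- pv_equiv track=rewrite | github.com/CristinaaPichiu/Python-2023 | Laborator2/p7.py | count_and_find_palindromes
-- ===== SOURCE A (Python) =====
-- def is_palindrome(number):
--     if number < 0 or (number % 10 == 0 and number != 0):
--         return False
--
--     reversed_number = 0
--     original_number = number
--
--     while number > 0:
--         reversed_number = reversed_number * 10 + number % 10
--         number = number // 10
--
--     return original_number == reversed_number
--
-- def count_and_find_palindromes(numbers):
--     palindrome_count = 0
--     greatest_palindrome = None
--
--     for number in numbers:
--         if is_palindrome(number):
--             palindrome_count += 1
--             if greatest_palindrome is None or number > greatest_palindrome: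
--                 greatest_palindrome = number
--
--     return (palindrome_count, greatest_palindrome)
-- ===== SOURCE B (Python) =====
-- def is_palindrome(number):
--     if number < 0:
--         return False
--     digits = []
--     while number > 0:
--         digits.append(number % 10)
--         number //= 10
--     return digits == digits[::-1]
--
--
-- def count_and_find_palindromes(numbers):
--     pals = [n for n in numbers if is_palindrome(n)]
--     return (len(pals), max(pals) if pals else None)
-- ===== Notes on version B (the rewrite author's own statement) =====
-- stated objective: alternative
-- what changed: is_palindrome builds the digit list and compares it with its reverse instead of arithmetically reconstructing the reversed number, and the aggregation filters the palindromes into a list once and reduces it with len/max instead of a single running count/running-max loop.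
import Mathlib
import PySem

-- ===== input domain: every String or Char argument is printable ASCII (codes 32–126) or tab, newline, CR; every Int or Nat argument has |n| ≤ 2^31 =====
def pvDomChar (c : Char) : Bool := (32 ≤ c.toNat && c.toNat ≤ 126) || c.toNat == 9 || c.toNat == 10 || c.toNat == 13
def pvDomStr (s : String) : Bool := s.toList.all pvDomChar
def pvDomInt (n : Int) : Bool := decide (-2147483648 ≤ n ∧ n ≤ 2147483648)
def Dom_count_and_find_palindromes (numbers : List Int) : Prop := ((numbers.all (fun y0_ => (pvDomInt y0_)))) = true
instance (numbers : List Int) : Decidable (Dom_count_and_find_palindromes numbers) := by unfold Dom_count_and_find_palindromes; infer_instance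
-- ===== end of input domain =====

-- B checks palindromicity by comparing the digit list with its reverse (instead of A's arithmetic
-- re-construction of the reversed number) and aggregates by filtering once and reducing with len/max
-- (instead of A's single running count/max loop); same results, similar cost.

-- ===== PORT A =====
-- the `while number > 0` loop of A's is_palindrome
def pyRevLoop (number rev : Int) : Int :=
  if _h : 0 < number then
    pyRevLoop (PySem.Int.floordiv number 10) (rev * 10 + PySem.Int.mod number 10)
  else rev
termination_by number.toNat
decreasing_by
  rw [PySem.Int.floordiv_eq_ediv_of_pos (by omega : (0:Int) < 10)]; omega

def is_palindrome (number : Int) : Bool :=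
  if number < 0 ∨ (PySem.Int.mod number 10 = 0 ∧ number ≠ 0) then false
  else number == pyRevLoop number 0

def count_and_find_palindromes (numbers : List Int) : Int × Option Int :=
  numbers.foldl
    (fun (st : Int × Option Int) number =>
      if is_palindrome number then
        (st.1 + 1,
         match st.2 with
         | none => some number
         | some g => if number > g then some number else some g)
      else st)
    (0, none)

-- ===== PORT B =====
-- the digit-collecting `while number > 0` loop of B's is_palindrome
def digitsOf (number : Int) : List Int :=
  if _h : 0 < number then
    PySem.Int.mod number 10 :: digitsOf (PySem.Int.floordiv number 10)
  else []
termination_by number.toNat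
decreasing_by
  rw [PySem.Int.floordiv_eq_ediv_of_pos (by omega : (0:Int) < 10)]; omega

-- ds[::-1] is List.reverse (PySem.List.slice?_none_none_neg_one)
def is_palindrome_b (number : Int) : Bool :=
  if number < 0 then false
  else
    let ds := digitsOf number
    ds == ds.reverse

def count_and_find_palindromes_alt (numbers : List Int) : Int × Option Int :=
  let pals := numbers.filter is_palindrome_b
  ((pals.length : Int), if pals.isEmpty then none else PySem.List.max? pals (fun y => y))

-- ===== PRECONDITION & SPEC =====
def Spec_count_and_find_palindromes (numbers : List Int) (out : Int × Option Int) : Prop := out = count_and_find_palindromes_alt numbers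
instance (numbers : List Int) (out : Int × Option Int) : Decidable (Spec_count_and_find_palindromes numbers out) := by unfold Spec_count_and_find_palindromes; infer_instance

-- ===== CLAIM (what is proved, stated in full; the proofs are below) =====
def Claim_equal_count_and_find_palindromes : Prop := ∀ (numbers : List Int), Dom_count_and_find_palindromes numbers → Spec_count_and_find_palindromes numbers (count_and_find_palindromes numbers)

-- ===== LEMMAS AND PROOFS =====

-- value of a least-significant-first digit list
def fromLSB (l : List Int) : Int := l.foldr (fun d a => d + 10 * a) 0

theorem digitsOf_bounds (n : Int) : ∀ d ∈ digitsOf n, 0 ≤ d ∧ d < 10 := by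
  induction n using digitsOf.induct with
  | case1 n h ih =>
    rw [digitsOf, dif_pos h]
    intro d hd
    rcases List.mem_cons.mp hd with rfl | hd
    · exact ⟨PySem.Int.mod_nonneg n (by omega), PySem.Int.mod_lt n (by omega)⟩
    · exact ih d hd
  | case2 n h =>
    rw [digitsOf, dif_neg h]; intro d hd; simp at hd

theorem fromLSB_digitsOf (n : Int) (hn : 0 ≤ n) : fromLSB (digitsOf n) = n := by
  induction n using digitsOf.induct with
  | case1 n h ih =>
    rw [digitsOf, dif_pos h]
    have hq : 0 ≤ PySem.Int.floordiv n 10 := by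
      rw [PySem.Int.floordiv_eq_ediv_of_pos (by omega : (0:Int) < 10)]; omega
    have := PySem.Int.floordiv_mul_add_mod n 10
    simp only [fromLSB, List.foldr_cons]
    have ih' := ih hq
    simp only [fromLSB] at ih'
    rw [ih']; omega
  | case2 n h =>
    rw [digitsOf, dif_neg h]; simp [fromLSB]; omega

theorem pyRevLoop_foldl (n : Int) : ∀ r : Int,
    pyRevLoop n r = (digitsOf n).foldl (fun a d => a * 10 + d) r := by
  induction n using digitsOf.induct with
  | case1 n h ih =>
    intro r
    rw [digitsOf, dif_pos h, pyRevLoop, dif_pos h, List.foldl_cons, ih]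
  | case2 n h =>
    intro r
    rw [digitsOf, dif_neg h, pyRevLoop, dif_neg h, List.foldl_nil]

theorem fromLSB_reverse (l : List Int) :
    fromLSB l.reverse = l.foldl (fun a d => a * 10 + d) 0 := by
  unfold fromLSB
  rw [List.foldr_reverse]
  congr 1
  funext a d
  ring

theorem fromLSB_inj (l1 : List Int) : ∀ l2 : List Int, l1.length = l2.length →
    (∀ d ∈ l1, 0 ≤ d ∧ d < 10) → (∀ d ∈ l2, 0 ≤ d ∧ d < 10) →
    fromLSB l1 = fromLSB l2 → l1 = l2 := by
  induction l1 with
  | nil => intro l2 hlen _ _ _; cases l2 <;> simp_all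
  | cons d1 t1 ih =>
    intro l2 hlen hb1 hb2 hv
    cases l2 with
    | nil => simp at hlen
    | cons d2 t2 =>
      simp only [fromLSB, List.foldr_cons] at hv
      have hd1 := hb1 d1 (by simp)
      have hd2 := hb2 d2 (by simp)
      have hde : d1 = d2 ∧ fromLSB t1 = fromLSB t2 := by
        simp only [fromLSB] at hv ⊢; omega
      have ht : t1 = t2 := by
        refine ih t2 (by simpa using hlen) ?_ ?_ hde.2
        · exact fun d hd => hb1 d (by simp [hd])
        · exact fun d hd => hb2 d (by simp [hd])
      rw [hde.1, ht]

theorem digitsOf_getLast_ne_zero (n : Int) (hn : 0 < n) :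
    (digitsOf n).getLast? ≠ some 0 := by
  induction n using digitsOf.induct with
  | case1 n h ih =>
    rw [digitsOf, dif_pos h]
    by_cases hq : 0 < PySem.Int.floordiv n 10
    · have hcons : digitsOf (PySem.Int.floordiv n 10)
          = PySem.Int.mod (PySem.Int.floordiv n 10) 10
            :: digitsOf (PySem.Int.floordiv (PySem.Int.floordiv n 10) 10) := by
        rw [digitsOf, dif_pos hq]
      rw [hcons, List.getLast?_cons_cons, ← hcons]
      exact ih hq
    · have : digitsOf (PySem.Int.floordiv n 10) = [] := by
        rw [digitsOf, dif_neg hq]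
      rw [this]
      have h10 := PySem.Int.floordiv_eq_ediv_of_pos (by omega : (0:Int) < 10) (a := n)
      have hm := PySem.Int.mod_eq_emod_of_pos (by omega : (0:Int) < 10) (a := n)
      simp only [List.getLast?_singleton, ne_eq, Option.some.injEq]
      rw [hm]
      rw [h10] at hq
      omega
  | case2 n h => omega

theorem pal_eq (n : Int) : is_palindrome n = is_palindrome_b n := by
  by_cases hneg : n < 0
  · simp [is_palindrome, is_palindrome_b, hneg]
  by_cases h0 : n = 0
  · subst h0
    have h1 : digitsOf 0 = [] := by rw [digitsOf]; simp
    have h2 : pyRevLoop 0 0 = 0 := by rw [pyRevLoop]; simp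
    simp [is_palindrome, is_palindrome_b, h1, h2, PySem.Int.mod]
  have hpos : 0 < n := by omega
  have hval : fromLSB (digitsOf n) = n := fromLSB_digitsOf n (by omega)
  have hloop : pyRevLoop n 0 = fromLSB (digitsOf n).reverse := by
    rw [pyRevLoop_foldl n 0, fromLSB_reverse]
  by_cases hm : PySem.Int.mod n 10 = 0
  · -- A returns false on positive multiples of 10; B's digit list starts with 0 but ends nonzero
    have hA : is_palindrome n = false := by
      rw [is_palindrome, if_pos (Or.inr ⟨hm, h0⟩)]
    rw [hA]
    have hds : digitsOf n = 0 :: digitsOf (PySem.Int.floordiv n 10) := by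
      rw [digitsOf, dif_pos hpos, hm]
    symm
    simp only [is_palindrome_b, if_neg hneg, beq_eq_false_iff_ne, ne_eq]
    intro heq
    have hhead : (digitsOf n).head? = some 0 := by rw [hds]; rfl
    have hlast : (digitsOf n).getLast? = some 0 := by
      rw [← List.head?_reverse, ← heq, hhead]
    exact digitsOf_getLast_ne_zero n hpos hlast
  · have hA : is_palindrome n = (n == pyRevLoop n 0) := by
      rw [is_palindrome, if_neg (by rintro (h | ⟨h1, _⟩); exacts [hneg h, hm h1])]
    have hB : is_palindrome_b n = (digitsOf n == (digitsOf n).reverse) := by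
      simp [is_palindrome_b, hneg]
    rw [hA, hB]
    have : (n = pyRevLoop n 0) ↔ (digitsOf n = (digitsOf n).reverse) := by
      constructor
      · intro he
        refine fromLSB_inj _ _ (by simp) (digitsOf_bounds n)
          (fun d hd => digitsOf_bounds n d (List.mem_reverse.mp hd)) ?_
        rw [hval, ← hloop]
        exact he
      · intro he
        rw [hloop, ← he, hval]
    rw [Bool.eq_iff_iff]
    simpa using this

-- A's running max as a standalone fold
def runMax (g : Option Int) (l : List Int) : Option Int :=
  l.foldl (fun g n => match g with
    | none => some n
    | some m => if n > m then some n else some m) g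

theorem runMax_some (l : List Int) : ∀ m : Int, runMax (some m) l = some (l.foldl max m) := by
  induction l with
  | nil => intro m; rfl
  | cons x t ih =>
    intro m
    simp only [runMax, List.foldl_cons] at *
    rw [show (if x > m then some x else some m) = some (max m x) by
      by_cases hx : x > m
      · simp [hx, max_eq_right (by omega : m ≤ x)]
      · simp [hx, max_eq_left (by omega : x ≤ m)]]
    exact ih (max m x)

theorem fold_agg (l : List Int) : ∀ (c : Int) (g : Option Int),
    l.foldl
      (fun (st : Int × Option Int) number =>
        if is_palindrome number then
          (st.1 + 1,
           match st.2 with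
           | none => some number
           | some g => if number > g then some number else some g)
        else st)
      (c, g)
    = (c + ((l.filter is_palindrome_b).length : Int), runMax g (l.filter is_palindrome_b)) := by
  induction l with
  | nil => intro c g; simp [runMax]
  | cons x t ih =>
    intro c g
    rw [List.foldl_cons, List.filter_cons, pal_eq]
    by_cases hx : is_palindrome_b x
    · simp only [hx, if_pos]
      rw [ih]
      simp only [runMax, List.foldl_cons, List.length_cons]
      congr 1
      push_cast
      ring
    · simp only [hx, if_neg, Bool.false_eq_true, not_false_iff]
      exact ih c g

-- ===== VERDICT (by name: the statement is the Claim_ definition above) =====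
theorem count_and_find_palindromes_spec : Claim_equal_count_and_find_palindromes := by
  intro numbers _
  unfold Spec_count_and_find_palindromes count_and_find_palindromes count_and_find_palindromes_alt
  rw [fold_agg]
  cases hp : numbers.filter is_palindrome_b with
  | nil => simp [runMax]
  | cons x t =>
    simp only [List.isEmpty_cons, if_neg Bool.false_ne_true, PySem.List.max?_id_cons]
    have : runMax none (x :: t) = some (t.foldl max x) := by
      simp only [runMax, List.foldl_cons]
      exact runMax_some t x
    rw [this]
    simp
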